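-- pv_equiv track=rewrite | github.com/pallab-dev/salesforce-job-agent | backend/job_agent/agent.py | _keyword_token_fallback_terms
-- ===== SOURCE A (Python) =====
-- def _keyword_chunks(keyword: str) -> list[str]:
--     raw = str(keyword or "").strip().lower()
--     if not raw:
--         return []
--     parts = [part.strip() for part in raw.split(",")]
--     chunks = [part for part in parts if part]
--     if not chunks:
--         return [raw]
--     seen: set[str] = set()
--     out: list[str] = []
--     for chunk in chunks:
--         if chunk in seen:
--             continue
--         seen.add(chunk)
--         out.append(chunk)
--     return out
--
-- def _keyword_token_fallback_terms(keyword: str) -> list[str]: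
--     raw_tokens: list[str] = []
--     for chunk in _keyword_chunks(keyword):
--         raw_tokens.extend(chunk.split())
--     seen: set[str] = set()
--     out: list[str] = []
--     for token in raw_tokens:
--         token = token.strip().lower()
--         if len(token) < 3 or token in seen:
--             continue
--         seen.add(token)
--         out.append(token)
--     return out if len(out) >= 2 else []
-- ===== SOURCE B (Python) =====
-- def _keyword_token_fallback_terms(keyword: str) -> list[str]:
--     raw = str(keyword or "").strip().lower()
--     seen: set[str] = set()
--     out: list[str] = []
--     for tok in raw.replace(",", " ").split():
--         if len(tok) >= 3 and tok not in seen: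
--             seen.add(tok)
--             out.append(tok)
--     return out if len(out) >= 2 else []
-- ===== Notes on version B (the rewrite author's own statement) =====
-- stated objective: simpler
-- what changed: Replaces the two-stage pipeline (comma-chunking helper with its own dedup set, then a second tokenize+dedup pass) by a single pass: commas are turned into spaces, the string is split once on whitespace, and one seen-set filter builds the result.
-- intended difference: On keywords whose stripped text is nonempty and consists only of commas and whitespace with at least two distinct runs of >=3 commas (e.g. ',,, ,,,,'), A returns those comma strings as terms while B returns []; comma runs are separators, not keyword tokens, so [] is the intended value. — e.g. on _keyword_token_fallback_terms(",,, ,,,,"): A returns [",,,", ",,,,"], B returns []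
import Mathlib
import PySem

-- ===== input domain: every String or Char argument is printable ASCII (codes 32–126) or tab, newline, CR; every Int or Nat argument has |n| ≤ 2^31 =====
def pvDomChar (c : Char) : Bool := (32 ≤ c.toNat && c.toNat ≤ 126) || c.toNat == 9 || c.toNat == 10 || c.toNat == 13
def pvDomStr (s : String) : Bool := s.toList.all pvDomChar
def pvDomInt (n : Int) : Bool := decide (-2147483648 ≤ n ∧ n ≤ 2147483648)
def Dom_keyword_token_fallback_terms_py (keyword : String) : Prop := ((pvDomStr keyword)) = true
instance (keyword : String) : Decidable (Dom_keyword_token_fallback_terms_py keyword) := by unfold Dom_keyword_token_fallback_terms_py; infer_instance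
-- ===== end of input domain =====

-- B replaces A's two-stage comma-chunk/dedup pipeline by one whitespace split after turning commas
-- into spaces, with a single seen-set pass (objective: simpler; equal returns except the D_ corner below).

-- ===== PORT A =====
-- port of helper _keyword_chunks (list side; PySem.Str.* are these Chars functions on .toList)
def pvKeywordChunks (keyword : String) : List (List Char) :=
  let raw := PySem.Chars.lower (PySem.Chars.strip keyword.toList)
  if raw.isEmpty then []
  else
    let parts := (PySem.Chars.splitOn raw [',']).map PySem.Chars.strip
    let chunks := parts.filter (fun p => !p.isEmpty)
    if chunks.isEmpty then [raw]
    else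
      (chunks.foldl
        (fun (st : PySem.Set (List Char) × List (List Char)) c =>
          if PySem.Set.contains st.1 c then st else (PySem.Set.add st.1 c, st.2 ++ [c]))
        (PySem.Set.empty, [])).2

def keyword_token_fallback_terms_py (keyword : String) : List String :=
  let rawTokens := (pvKeywordChunks keyword).foldl (fun acc chunk => acc ++ PySem.Chars.split₀ chunk) []
  let out := (rawTokens.foldl
      (fun (st : PySem.Set (List Char) × List (List Char)) tok =>
        let t := PySem.Chars.lower (PySem.Chars.strip tok)
        if decide (PySem.Chars.len t < 3) || PySem.Set.contains st.1 t then st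
        else (PySem.Set.add st.1 t, st.2 ++ [t]))
      (PySem.Set.empty, [])).2
  if 2 ≤ out.length then out.map String.ofList else []

-- ===== PORT B =====
def keyword_token_fallback_terms_py_alt (keyword : String) : List String :=
  let raw := PySem.Chars.lower (PySem.Chars.strip keyword.toList)
  let out := ((PySem.Chars.split₀ (PySem.Chars.replace raw [','] [' '])).foldl
      (fun (st : PySem.Set (List Char) × List (List Char)) tok =>
        if decide (3 ≤ PySem.Chars.len tok) && !(PySem.Set.contains st.1 tok)
        then (PySem.Set.add st.1 tok, st.2 ++ [tok]) else st)
      (PySem.Set.empty, [])).2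
  if 2 ≤ out.length then out.map String.ofList else []

-- ===== PRECONDITION & SPEC =====
-- On keywords whose stripped text is nonempty and consists only of commas and whitespace with at
-- least two distinct runs of ≥3 commas (e.g. ",,, ,,,,"), A returns those comma strings as terms
-- while B returns []; comma runs are separators, not keyword tokens, so [] is the intended value.
def D_keyword_token_fallback_terms_py (keyword : String) : Prop :=
  let raw := PySem.Chars.lower (PySem.Chars.strip keyword.toList)
  raw ≠ [] ∧ (∀ c ∈ raw, c = ',' ∨ PySem.Chars.isspace c = true) ∧
    2 ≤ (PySem.List.dedup ((PySem.Chars.split₀ raw).filter (fun t => decide (3 ≤ t.length)))).length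
instance (keyword : String) : Decidable (D_keyword_token_fallback_terms_py keyword) := by
  unfold D_keyword_token_fallback_terms_py; infer_instance

def Spec_keyword_token_fallback_terms_py (keyword : String) (out : List String) : Prop :=
  ¬ D_keyword_token_fallback_terms_py keyword → out = keyword_token_fallback_terms_py_alt keyword
instance (keyword : String) (out : List String) : Decidable (Spec_keyword_token_fallback_terms_py keyword out) := by
  unfold Spec_keyword_token_fallback_terms_py; infer_instance

def pvDiffWitness_keyword_token_fallback_terms_py : String := ",,, ,,,,"
def pvDiffWitnessOut_keyword_token_fallback_terms_py : (List String) × (List String) :=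
  ([",,,", ",,,,"], [])

-- ===== CLAIM (what is proved, stated in full; the proofs are below) =====
def Claim_unchanged_keyword_token_fallback_terms_py : Prop := ∀ (keyword : String), Dom_keyword_token_fallback_terms_py keyword → Spec_keyword_token_fallback_terms_py keyword (keyword_token_fallback_terms_py keyword)
def Claim_changed_keyword_token_fallback_terms_py : Prop := Dom_keyword_token_fallback_terms_py (pvDiffWitness_keyword_token_fallback_terms_py) ∧ D_keyword_token_fallback_terms_py (pvDiffWitness_keyword_token_fallback_terms_py) ∧ keyword_token_fallback_terms_py (pvDiffWitness_keyword_token_fallback_terms_py) = pvDiffWitnessOut_keyword_token_fallback_terms_py.1 ∧ keyword_token_fallback_terms_py_alt (pvDiffWitness_keyword_token_fallback_terms_py) = pvDiffWitnessOut_keyword_token_fallback_terms_py.2 ∧ pvDiffWitnessOut_keyword_token_fallback_terms_py.1 ≠ pvDiffWitnessOut_keyword_token_fallback_terms_py.2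
def Claim_exact_keyword_token_fallback_terms_py : Prop := ∀ (keyword : String), Dom_keyword_token_fallback_terms_py keyword → D_keyword_token_fallback_terms_py keyword → keyword_token_fallback_terms_py keyword ≠ keyword_token_fallback_terms_py_alt keyword

-- ===== LEMMAS AND PROOFS =====

def pvSegs : List Char → List (List Char)
  | [] => [[]]
  | c :: cs => if c = ',' then [] :: pvSegs cs else (c :: (pvSegs cs).headI) :: (pvSegs cs).tail

theorem pvSegs_ne_nil (cs : List Char) : pvSegs cs ≠ [] := by
  cases cs with
  | nil => simp [pvSegs]
  | cons c cs => simp only [pvSegs]; split <;> simp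

theorem pvSegs_append (t r : List Char) (ht : ∀ c ∈ t, c ≠ ',') :
    pvSegs (t ++ r) = (t ++ (pvSegs r).headI) :: (pvSegs r).tail := by
  induction t with
  | nil =>
    simp only [List.nil_append]
    cases h : pvSegs r with
    | nil => exact absurd h (pvSegs_ne_nil r)
    | cons a l => simp [h]
  | cons c t ih =>
    have hc : c ≠ ',' := ht c (by simp)
    simp only [List.cons_append, pvSegs, if_neg hc, ih (fun c hc => ht c (by simp [hc]))]
    simp

theorem pvSegs_sound (cs : List Char) :
    ∀ p ∈ pvSegs cs, ∀ c ∈ p, c ∈ cs ∧ c ≠ ',' := by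
  induction cs with
  | nil => intro p hp c hc; simp [pvSegs] at hp; simp [hp] at hc
  | cons a cs ih =>
    intro p hp c hc
    by_cases ha : a = ','
    · simp only [pvSegs, if_pos ha] at hp
      rcases List.mem_cons.1 hp with h | h
      · simp [h] at hc
      · have := ih p h c hc; exact ⟨by simp [this.1], this.2⟩
    · simp only [pvSegs, if_neg ha] at hp
      cases hseg : pvSegs cs with
      | nil => exact absurd hseg (pvSegs_ne_nil cs)
      | cons q qs =>
        rw [hseg] at hp; simp at hp
        rcases hp with h | h
        · subst h
          rcases List.mem_cons.1 hc with h | h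
          · subst h; exact ⟨by simp, ha⟩
          · have := ih q (by simp [hseg]) c h; exact ⟨by simp [this.1], this.2⟩
        · have := ih p (by simp [hseg, h]) c hc; exact ⟨by simp [this.1], this.2⟩

theorem pvSegs_complete (cs : List Char) :
    ∀ c ∈ cs, c = ',' ∨ ∃ p ∈ pvSegs cs, c ∈ p := by
  induction cs with
  | nil => simp
  | cons a cs ih =>
    intro c hc
    by_cases ha : a = ','
    · rcases List.mem_cons.1 hc with h | h
      · left; rw [h, ha]
      · rcases ih c h with h' | ⟨p, hp, hcp⟩
        · left; exact h'
        · right; exact ⟨p, by simp [pvSegs, if_pos ha, hp], hcp⟩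
    · cases hseg : pvSegs cs with
      | nil => exact absurd hseg (pvSegs_ne_nil cs)
      | cons q qs =>
        rcases List.mem_cons.1 hc with h | h
        · right; exact ⟨a :: q, by simp [pvSegs, if_neg ha, hseg], by simp [h]⟩
        · rcases ih c h with h' | ⟨p, hp, hcp⟩
          · left; exact h'
          · rw [hseg] at hp
            rcases List.mem_cons.1 hp with h2 | h2
            · right; exact ⟨a :: q, by simp [pvSegs, if_neg ha, hseg], by simp [h2 ▸ hcp]⟩
            · right; exact ⟨p, by simp [pvSegs, if_neg ha, hseg, h2], hcp⟩

def pvToks (Q : Char → Bool) : List Char → List (List Char)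
  | [] => []
  | c :: cs =>
    if Q c then pvToks Q cs
    else (c :: cs.takeWhile (fun d => !Q d)) :: pvToks Q (cs.dropWhile (fun d => !Q d))
  termination_by cs => cs.length
  decreasing_by
    · simp
    · exact Nat.lt_succ_of_le (cs.length_dropWhile_le _)

theorem pvToks_sound (Q : Char → Bool) (cs : List Char) :
    ∀ t ∈ pvToks Q cs, t ≠ [] ∧ ∀ c ∈ t, Q c = false ∧ c ∈ cs := by
  induction cs using pvToks.induct Q with
  | case1 => simp [pvToks]
  | case2 c cs hQ ih =>
    rw [pvToks, if_pos hQ]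
    intro t ht
    obtain ⟨h1, h2⟩ := ih t ht
    exact ⟨h1, fun d hd => ⟨(h2 d hd).1, by simp [(h2 d hd).2]⟩⟩
  | case3 c cs hQ ih =>
    rw [pvToks, if_neg hQ]
    intro t ht
    rcases List.mem_cons.1 ht with h | h
    · subst h
      refine ⟨by simp, ?_⟩
      intro d hd
      rcases List.mem_cons.1 hd with h | h
      · subst h; exact ⟨by simpa using hQ, by simp⟩
      · have h1 := List.mem_takeWhile_imp h
        have h2 := List.takeWhile_subset (l := cs) (p := fun d => !Q d) h
        exact ⟨by simpa using h1, by simp [h2]⟩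
    · obtain ⟨h1, h2⟩ := ih t h
      refine ⟨h1, fun d hd => ⟨(h2 d hd).1, ?_⟩⟩
      have := (List.dropWhile_sublist (l := cs) (p := fun d => !Q d)).subset (h2 d hd).2
      simp [this]

theorem pvToks_eq_nil (Q : Char → Bool) (cs : List Char) (h : ∀ c ∈ cs, Q c = true) :
    pvToks Q cs = [] := by
  induction cs with
  | nil => rw [pvToks]
  | cons c cs ih =>
    rw [pvToks, if_pos (h c (by simp))]
    exact ih (fun d hd => h d (by simp [hd]))

theorem pvToks_append_sep (Q : Char → Bool) (t u : List Char) (ht : ∀ c ∈ t, Q c = false)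
    (hne : t ≠ []) (hu : u = [] ∨ Q u.headI = true) :
    pvToks Q (t ++ u) = t :: pvToks Q u := by
  have htw : u.takeWhile (fun d => !Q d) = [] := by
    rcases hu with h | h
    · simp [h]
    · cases u with
      | nil => simp
      | cons a u => simp at h; simp [List.takeWhile_cons, h]
  have hdw : u.dropWhile (fun d => !Q d) = u := by
    rcases hu with h | h
    · simp [h]
    · cases u with
      | nil => simp
      | cons a u => simp at h; simp [List.dropWhile_cons, h]
  cases t with
  | nil => exact absurd rfl hne
  | cons c t =>
    rw [List.cons_append, pvToks, if_neg (by simp [ht c (by simp)])]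
    have h2 : t.takeWhile (fun d => !Q d) = t :=
      List.takeWhile_eq_self_iff.2 (by intro d hd; simp [ht d (by simp [hd])])
    have h1 : t.dropWhile (fun d => !Q d) = [] :=
      List.dropWhile_eq_nil_iff.2 (by intro d hd; simp [ht d (by simp [hd])])
    rw [List.takeWhile_append, List.dropWhile_append, h2, h1]
    simp [htw, hdw]

theorem pvToks_append_ws (Q : Char → Bool) (s u : List Char) (hu : ∀ c ∈ u, Q c = true) :
    pvToks Q (s ++ u) = pvToks Q s := by
  induction s using pvToks.induct Q with
  | case1 => simpa [pvToks] using pvToks_eq_nil Q u hu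
  | case2 c s hQ ih => rw [List.cons_append, pvToks, if_pos hQ, ih, pvToks, if_pos hQ]
  | case3 c s hQ ih =>
    rw [List.cons_append, pvToks, if_neg hQ, pvToks, if_neg hQ]
    have hwu : u.takeWhile (fun d => !Q d) = [] := by
      cases u with
      | nil => simp
      | cons a u => simp [List.takeWhile_cons, hu a (by simp)]
    have hdu : u.dropWhile (fun d => !Q d) = u := by
      cases u with
      | nil => simp
      | cons a u => simp [List.dropWhile_cons, hu a (by simp)]
    rw [List.takeWhile_append, List.dropWhile_append]
    by_cases hall : ∀ d ∈ s, Q d = false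
    · have h2 : s.takeWhile (fun d => !Q d) = s :=
        List.takeWhile_eq_self_iff.2 (by intro d hd; simp [hall d hd])
      have h1 : s.dropWhile (fun d => !Q d) = [] :=
        List.dropWhile_eq_nil_iff.2 (by intro d hd; simp [hall d hd])
      rw [h2, h1]
      simp [hwu, hdu, h1, h2, pvToks_eq_nil Q u hu]
      exact pvToks_eq_nil Q [] (by simp)
    · push_neg at hall
      obtain ⟨d, hd, hQd⟩ := hall
      have h2 : s.takeWhile (fun d => !Q d) ≠ s := by
        intro hcontra
        have := List.mem_takeWhile_imp (hcontra ▸ hd)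
        simp [hQd] at this
      have hlen : (s.takeWhile (fun d => !Q d)).length ≠ s.length := by
        intro hcontra
        exact h2 ((s.takeWhile_prefix (p := fun d => !Q d)).eq_of_length hcontra)
      have h1 : s.dropWhile (fun d => !Q d) ≠ [] := by
        intro hcontra
        have := List.takeWhile_append_dropWhile (p := fun d => !Q d) (l := s)
        rw [hcontra, List.append_nil] at this
        exact h2 this
      rw [if_neg hlen, if_neg (by simpa using h1)]
      exact congrArg _ ih

def pvSub (c : Char) : Char := if c = ',' then ' ' else c
def pvSep (c : Char) : Bool := PySem.Chars.isspace c || c == ','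

theorem pvToks_strip (cs : List Char) :
    pvToks PySem.Chars.isspace (PySem.Chars.strip cs) = pvToks PySem.Chars.isspace cs := by
  have hl : ∀ (l : List Char), pvToks PySem.Chars.isspace (PySem.Chars.lstrip l)
      = pvToks PySem.Chars.isspace l := by
    intro l
    induction l with
    | nil => rfl
    | cons c l ih =>
      by_cases h : PySem.Chars.isspace c
      · rw [PySem.Chars.lstrip, List.dropWhile_cons_of_pos h]
        rw [← PySem.Chars.lstrip, ih, pvToks, if_pos h]
      · rw [PySem.Chars.lstrip, List.dropWhile_cons_of_neg (by simpa using h)]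
  have hr : ∀ (l : List Char), pvToks PySem.Chars.isspace (PySem.Chars.rstrip l)
      = pvToks PySem.Chars.isspace l := by
    intro l
    have hdecomp : l = PySem.Chars.rstrip l ++ (l.reverse.takeWhile PySem.Chars.isspace).reverse := by
      rw [PySem.Chars.rstrip, ← List.reverse_append, List.takeWhile_append_dropWhile, List.reverse_reverse]
    conv_rhs => rw [hdecomp]
    rw [pvToks_append_ws]
    intro c hc
    rw [List.mem_reverse] at hc
    exact List.mem_takeWhile_imp hc
  rw [PySem.Chars.strip, hr, hl]

theorem pvSub_isspace (c : Char) :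
    PySem.Chars.isspace (pvSub c) = pvSep c := by
  by_cases h : c = ','
  · subst h; simp [pvSub, pvSep]; decide
  · simp [pvSub, if_neg h, pvSep, h]

theorem pvToks_map_sub (cs : List Char) :
    pvToks PySem.Chars.isspace (cs.map pvSub) = pvToks pvSep cs := by
  induction cs using pvToks.induct pvSep with
  | case1 => rw [pvToks]; rw [List.map_nil, pvToks]
  | case2 c cs hQ ih =>
    rw [List.map_cons, pvToks, if_pos (by rw [pvSub_isspace]; exact hQ), ih, pvToks, if_pos hQ]
  | case3 c cs hQ ih =>
    have hc : pvSub c = c := by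
      have : c ≠ ',' := by intro h; subst h; simp [pvSep] at hQ
      simp [pvSub, this]
    have hfun : ((fun d => !PySem.Chars.isspace d) ∘ pvSub) = (fun d => !pvSep d) :=
      funext fun d => by simp [pvSub_isspace]
    have hmapid : (cs.takeWhile (fun d => !pvSep d)).map pvSub = cs.takeWhile (fun d => !pvSep d) := by
      rw [List.map_congr_left, List.map_id]
      intro d hd
      have := List.mem_takeWhile_imp hd
      have hd' : d ≠ ',' := by intro h; subst h; simp [pvSep] at this
      simp [pvSub, hd']
    have htw : (cs.map pvSub).takeWhile (fun d => !PySem.Chars.isspace d)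
        = cs.takeWhile (fun d => !pvSep d) := by
      rw [List.takeWhile_map, hfun, hmapid]
    have hdw : (cs.map pvSub).dropWhile (fun d => !PySem.Chars.isspace d)
        = (cs.dropWhile (fun d => !pvSep d)).map pvSub := by
      rw [List.dropWhile_map, hfun]
    rw [List.map_cons, pvToks, if_neg (by rw [pvSub_isspace]; exact hQ), hc, htw, hdw, ih]
    rw [pvToks, if_neg hQ]

theorem pvDropWhile_head {α : Type} (p : α → Bool) (l : List α) (a : α) (l' : List α)
    (h : l.dropWhile p = a :: l') : p a = false := by
  induction l with
  | nil => simp at h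
  | cons c l ih =>
    by_cases hc : p c
    · rw [List.dropWhile_cons_of_pos hc] at h; exact ih h
    · rw [List.dropWhile_cons_of_neg hc] at h
      cases h; simpa using hc

theorem pvFlatMap_segs (cs : List Char) :
    (pvSegs cs).flatMap (pvToks PySem.Chars.isspace) = pvToks pvSep cs := by
  have hWnil : pvToks PySem.Chars.isspace [] = [] := by rw [pvToks]
  induction cs using pvToks.induct pvSep with
  | case1 => rw [pvToks]; simp [pvSegs, hWnil]
  | case2 c cs hQ ih =>
    rw [pvToks, if_pos hQ, ← ih]
    by_cases hc : c = ','
    · subst hc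
      rw [pvSegs, if_pos rfl]
      simp [hWnil]
    · have hW : PySem.Chars.isspace c = true := by
        simp [pvSep, hc] at hQ; exact hQ
      rw [pvSegs, if_neg hc]
      cases hseg : pvSegs cs with
      | nil => exact absurd hseg (pvSegs_ne_nil cs)
      | cons h tt =>
        simp only [hseg, List.headI_cons, List.tail_cons, List.flatMap_cons]
        rw [pvToks, if_pos hW]
  | case3 c cs hQ ih =>
    have hcomma : ∀ d ∈ c :: cs.takeWhile (fun d => !pvSep d), d ≠ ',' := by
      intro d hd
      rcases List.mem_cons.1 hd with h | h
      · subst h; intro h'; subst h'; simp [pvSep] at hQ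
      · have := List.mem_takeWhile_imp h
        intro h'; subst h'; simp [pvSep] at this
    have hnoWs : ∀ d ∈ c :: cs.takeWhile (fun d => !pvSep d), PySem.Chars.isspace d = false := by
      intro d hd
      rcases List.mem_cons.1 hd with h | h
      · subst h; simp [pvSep] at hQ; exact hQ.1
      · have := List.mem_takeWhile_imp h
        simp [pvSep] at this; exact this.1
    have hsplit : c :: cs = (c :: cs.takeWhile (fun d => !pvSep d)) ++ cs.dropWhile (fun d => !pvSep d) := by
      simp
    have hone : pvToks PySem.Chars.isspace (c :: cs.takeWhile (fun d => !pvSep d))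
        = [c :: cs.takeWhile (fun d => !pvSep d)] := by
      have h := pvToks_append_sep _ _ [] hnoWs (by simp) (Or.inl rfl)
      rw [List.append_nil, hWnil] at h
      exact h
    rw [pvToks, if_neg hQ, hsplit, pvSegs_append _ _ hcomma]
    cases hr : cs.dropWhile (fun d => !pvSep d) with
    | nil =>
      rw [hr] at ih
      have hsegnil : pvSegs ([] : List Char) = [[]] := by rw [pvSegs]
      rw [hsegnil, List.headI_cons, List.tail_cons, List.append_nil]
      simp only [List.flatMap_cons, List.flatMap_nil, List.append_nil, hone]
      rw [show pvToks pvSep [] = [] from by rw [pvToks]]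
    | cons d r' =>
      rw [hr] at ih
      have hd : pvSep d = true := by
        have := pvDropWhile_head _ cs d r' hr
        simpa using this
      by_cases hdc : d = ','
      · subst hdc
        have hsegr : pvSegs (',' :: r') = [] :: pvSegs r' := by rw [pvSegs, if_pos rfl]
        rw [hsegr, List.headI_cons, List.tail_cons, List.append_nil, List.flatMap_cons, hone]
        rw [← ih, hsegr, List.flatMap_cons, hWnil]
        simp
      · have hWd : PySem.Chars.isspace d = true := by
          simp [pvSep, hdc] at hd; exact hd
        have hsegr : pvSegs (d :: r') = (d :: (pvSegs r').headI) :: (pvSegs r').tail := by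
          rw [pvSegs, if_neg hdc]
        rw [hsegr, List.headI_cons, List.tail_cons, List.flatMap_cons]
        rw [pvToks_append_sep _ _ _ hnoWs (by simp) (Or.inr (by rw [List.headI_cons]; exact hWd))]
        simp only [List.cons_append, List.nil_append]
        rw [show pvToks PySem.Chars.isspace (d :: (pvSegs r').headI)
              ++ List.flatMap (pvToks PySem.Chars.isspace) (pvSegs r').tail
            = pvToks pvSep (d :: r') from by rw [← ih, hsegr, List.flatMap_cons]]

theorem pvStrip_eq_nil_iff (p : List Char) :
    PySem.Chars.strip p = [] ↔ ∀ c ∈ p, PySem.Chars.isspace c = true := by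
  rw [PySem.Chars.strip, PySem.Chars.rstrip, PySem.Chars.lstrip]
  constructor
  · intro h c hc
    rw [List.reverse_eq_nil_iff, List.dropWhile_eq_nil_iff] at h
    by_cases h1 : PySem.Chars.isspace c
    · exact h1
    · have hc2 : c ∈ List.dropWhile PySem.Chars.isspace p := by
        by_contra hc3
        have := List.takeWhile_append_dropWhile (p := PySem.Chars.isspace) (l := p)
        rw [← this] at hc
        rcases List.mem_append.1 hc with h4 | h4
        · exact h1 (List.mem_takeWhile_imp h4)
        · exact hc3 h4
      exact h c (by simpa using hc2)
  · intro h
    rw [List.reverse_eq_nil_iff, List.dropWhile_eq_nil_iff]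
    intro c hc
    simp only [List.mem_reverse] at hc
    exact h c ((List.dropWhile_sublist _).subset hc)

theorem pvStrip_subset (p : List Char) : ∀ c ∈ PySem.Chars.strip p, c ∈ p := by
  intro c hc
  rw [PySem.Chars.strip, PySem.Chars.rstrip, PySem.Chars.lstrip] at hc
  rw [List.mem_reverse] at hc
  have h1 := (List.dropWhile_sublist _).subset hc
  rw [List.mem_reverse] at h1
  exact (List.dropWhile_sublist _).subset h1

theorem pvStrip_of_noWs (t : List Char) (h : ∀ c ∈ t, PySem.Chars.isspace c = false) :
    PySem.Chars.strip t = t := by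
  rw [PySem.Chars.strip, PySem.Chars.lstrip,
    List.dropWhile_eq_self_iff.2 (fun hne => by simp [h _ (List.getElem_mem hne)]),
    PySem.Chars.rstrip,
    List.dropWhile_eq_self_iff.2 (fun hne => by
      simp only [List.length_reverse] at hne
      simp only [List.getElem_reverse]
      have hx : PySem.Chars.isspace (t[t.length - 1]'(by omega)) = false :=
        h _ (List.getElem_mem _)
      simp [hx]),
    List.reverse_reverse]

theorem pvUpperBounds (c : Char) (h : PySem.Chars.isupper c = true) :
    65 ≤ c.toNat ∧ c.toNat ≤ 90 := by
  unfold PySem.Chars.isupper at h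
  simp only [Bool.and_eq_true, decide_eq_true_eq, Char.le_def, UInt32.le_iff_toNat_le] at h
  exact h

theorem pvLowerChar_idem (c : Char) :
    PySem.Chars.lowerChar (PySem.Chars.lowerChar c) = PySem.Chars.lowerChar c := by
  by_cases h : PySem.Chars.isupper c
  · obtain ⟨h1, h2⟩ := pvUpperBounds c h
    have hnot : PySem.Chars.isupper (PySem.Chars.lowerChar c) = false := by
      rw [PySem.Chars.lowerChar, if_pos h]
      by_contra hcon
      have hb := pvUpperBounds _ (by simpa using hcon)
      rw [Char.toNat_ofNat, if_pos (Or.inl (by omega))] at hb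
      omega
    rw [PySem.Chars.lowerChar, if_neg (by simp [hnot])]
  · have hni : PySem.Chars.lowerChar c = c := by rw [PySem.Chars.lowerChar, if_neg h]
    rw [hni, hni]
theorem pvLower_fix (t u : List Char) (h : ∀ c ∈ t, c ∈ PySem.Chars.lower u) :
    PySem.Chars.lower t = t := by
  rw [PySem.Chars.lower, List.map_congr_left, List.map_id]
  intro c hc
  obtain ⟨d, _, hd⟩ := List.mem_map.1 (h c hc)
  rw [← hd]
  exact pvLowerChar_idem d

def pvG (s : PySem.Set (List Char)) : List (List Char) → List (List Char)
  | [] => []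
  | t :: ts =>
    if decide (3 ≤ t.length) && !(PySem.Set.contains s t)
    then t :: pvG (PySem.Set.add s t) ts else pvG s ts

def pvUpd (s : PySem.Set (List Char)) (ts : List (List Char)) : PySem.Set (List Char) :=
  ts.foldl (fun s t => if decide (3 ≤ t.length) then PySem.Set.add s t else s) s

theorem pvContains_false {s : PySem.Set (List Char)} {t : List Char} (hc : t ∉ s) :
    PySem.Set.contains s t = false :=
  Bool.eq_false_iff.2 (fun h => hc ((PySem.Set.contains_iff s t).1 h))

theorem pvUpd_cons (s : PySem.Set (List Char)) (t : List Char) (ts : List (List Char)) :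
    pvUpd s (t :: ts) = pvUpd (if decide (3 ≤ t.length) then PySem.Set.add s t else s) ts := rfl

theorem pvFoldl_eq (ts : List (List Char)) (s : PySem.Set (List Char)) (o : List (List Char)) :
    ts.foldl
      (fun (st : PySem.Set (List Char) × List (List Char)) tok =>
        if decide (3 ≤ PySem.Chars.len tok) && !(PySem.Set.contains st.1 tok)
        then (PySem.Set.add st.1 tok, st.2 ++ [tok]) else st) (s, o)
    = (pvUpd s ts, o ++ pvG s ts) := by
  induction ts generalizing s o with
  | nil => simp [pvUpd, pvG]
  | cons t ts ih =>
    rw [List.foldl_cons, pvUpd_cons]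
    by_cases h3 : 3 ≤ t.length
    · by_cases hc : t ∈ s
      · have hct : PySem.Set.contains s t = true := (PySem.Set.contains_iff s t).2 hc
        rw [if_neg (by rw [hct]; simp), ih, if_pos (by simp [h3]),
          PySem.Set.add_of_mem hc, pvG, if_neg (by rw [hct]; simp)]
      · have hcf : PySem.Set.contains s t = false := pvContains_false hc
        rw [if_pos (by rw [hcf]; simp [PySem.Chars.len]; exact_mod_cast h3), ih,
          if_pos (by simp [h3]), pvG, if_pos (by rw [hcf]; simp [h3])]
        simp
    · rw [if_neg (by simp [PySem.Chars.len]; omega), ih, if_neg (by simp [h3]),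
        pvG, if_neg (by simp [h3])]

theorem pvMem_upd (s : PySem.Set (List Char)) (ts : List (List Char)) (t : List Char) :
    t ∈ pvUpd s ts ↔ t ∈ s ∨ (t ∈ ts ∧ 3 ≤ t.length) := by
  induction ts generalizing s with
  | nil => simp [pvUpd]
  | cons u ts ih =>
    rw [pvUpd_cons, ih]
    by_cases h3 : 3 ≤ u.length
    · rw [if_pos (by simp [h3])]
      rw [PySem.Set.mem_add]
      constructor
      · rintro ((h | h) | h)
        · exact Or.inl h
        · exact Or.inr ⟨by simp [h], h ▸ h3⟩
        · exact Or.inr ⟨by simp [h.1], h.2⟩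
      · rintro (h | ⟨hm, hl⟩)
        · exact Or.inl (Or.inl h)
        · rcases List.mem_cons.1 hm with h' | h'
          · exact Or.inl (Or.inr h')
          · exact Or.inr ⟨h', hl⟩
    · rw [if_neg (by simp [h3])]
      constructor
      · rintro (h | h)
        · exact Or.inl h
        · exact Or.inr ⟨by simp [h.1], h.2⟩
      · rintro (h | ⟨hm, hl⟩)
        · exact Or.inl h
        · rcases List.mem_cons.1 hm with h' | h'
          · exact absurd (h' ▸ hl) h3
          · exact Or.inr ⟨h', hl⟩

theorem pvG_congr (s₁ s₂ : PySem.Set (List Char)) (ts : List (List Char))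
    (h : ∀ t, t ∈ s₁ ↔ t ∈ s₂) :
    pvG s₁ ts = pvG s₂ ts := by
  induction ts generalizing s₁ s₂ with
  | nil => rfl
  | cons t ts ih =>
    have hb : PySem.Set.contains s₁ t = PySem.Set.contains s₂ t := by
      by_cases hm : t ∈ s₂
      · rw [(PySem.Set.contains_iff _ _).2 hm, (PySem.Set.contains_iff _ _).2 ((h t).2 hm)]
      · rw [pvContains_false hm, pvContains_false (fun hx => hm ((h t).1 hx))]
    rw [pvG, pvG, hb]
    split
    · rw [ih (PySem.Set.add s₁ t) (PySem.Set.add s₂ t)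
        (fun u => by rw [PySem.Set.mem_add, PySem.Set.mem_add, h u])]
    · exact ih _ _ h

theorem pvG_append (s : PySem.Set (List Char)) (ts us : List (List Char)) :
    pvG s (ts ++ us) = pvG s ts ++ pvG (pvUpd s ts) us := by
  induction ts generalizing s with
  | nil => simp [pvG, pvUpd]
  | cons t ts ih =>
    rw [List.cons_append, pvG, pvG, pvUpd_cons]
    by_cases h3 : 3 ≤ t.length
    · by_cases hc : t ∈ s
      · have hcond : (decide (3 ≤ t.length) && !PySem.Set.contains s t) = false := by
          rw [(PySem.Set.contains_iff s t).2 hc]; simp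
        simp only [hcond, Bool.false_eq_true, if_false]
        rw [if_pos (show decide (3 ≤ t.length) = true by simp [h3]),
          PySem.Set.add_of_mem hc, ih]
      · have hcond : (decide (3 ≤ t.length) && !PySem.Set.contains s t) = true := by
          rw [pvContains_false hc]; simp [h3]
        simp only [hcond, if_true]
        rw [if_pos (show decide (3 ≤ t.length) = true by simp [h3]), ih]
        simp
    · have hcond : (decide (3 ≤ t.length) && !PySem.Set.contains s t) = false := by
        simp [h3]
      simp only [hcond, Bool.false_eq_true, if_false]
      rw [if_neg (show ¬ decide (3 ≤ t.length) = true by simp [h3]), ih]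

theorem pvG_nil_of_covered (s : PySem.Set (List Char)) (ts : List (List Char))
    (h : ∀ t ∈ ts, 3 ≤ t.length → t ∈ s) :
    pvG s ts = [] := by
  induction ts with
  | nil => rfl
  | cons t ts ih =>
    rw [pvG]
    by_cases h3 : 3 ≤ t.length
    · rw [if_neg (by rw [(PySem.Set.contains_iff s t).2 (h t (by simp) h3)]; simp)]
      exact ih (fun u hu => h u (by simp [hu]))
    · rw [if_neg (by simp [h3])]
      exact ih (fun u hu => h u (by simp [hu]))

theorem pvG_dedup (f : List Char → List (List Char)) (xs : List (List Char))
    (s : PySem.Set (List Char)) :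
    pvG s ((PySem.Set.ofList xs).flatMap f) = pvG s (xs.flatMap f) := by
  induction xs using List.reverseRecOn with
  | nil => simp [PySem.Set.ofList, PySem.Set.empty]
  | append_singleton xs x ih =>
    have hof : PySem.Set.ofList (xs ++ [x]) = PySem.Set.add (PySem.Set.ofList xs) x := by
      simp [PySem.Set.ofList]
    rw [hof, List.flatMap_append]
    by_cases hc : x ∈ PySem.Set.ofList xs
    · have hmem : x ∈ xs := (PySem.Set.mem_ofList xs x).1 hc
      rw [PySem.Set.add_of_mem hc, ih, pvG_append]
      have hnil : pvG (pvUpd s (List.flatMap f xs)) (List.flatMap f [x]) = [] :=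
        pvG_nil_of_covered _ _ (fun t ht h3 => by
          simp only [List.flatMap_cons, List.flatMap_nil, List.append_nil] at ht
          exact (pvMem_upd s _ t).2 (Or.inr ⟨List.mem_flatMap.2 ⟨x, hmem, ht⟩, h3⟩))
      rw [hnil, List.append_nil]
    · rw [PySem.Set.add_of_not_mem hc, List.flatMap_append, pvG_append, pvG_append, ih]
      congr 1
      apply pvG_congr
      intro t
      rw [pvMem_upd, pvMem_upd]
      constructor
      · rintro (h | ⟨hm, hl⟩)
        · exact Or.inl h
        · obtain ⟨y, hy, hty⟩ := List.mem_flatMap.1 hm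
          exact Or.inr ⟨List.mem_flatMap.2 ⟨y, (PySem.Set.mem_ofList xs y).1 hy, hty⟩, hl⟩
      · rintro (h | ⟨hm, hl⟩)
        · exact Or.inl h
        · obtain ⟨y, hy, hty⟩ := List.mem_flatMap.1 hm
          exact Or.inr ⟨List.mem_flatMap.2 ⟨y, (PySem.Set.mem_ofList xs y).2 hy, hty⟩, hl⟩

theorem pvUpd_eq_append (ts : List (List Char)) (s : PySem.Set (List Char)) :
    pvUpd s ts = s ++ pvG s ts := by
  induction ts generalizing s with
  | nil => simp [pvUpd, pvG]
  | cons t ts ih =>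
    rw [pvUpd_cons, pvG]
    by_cases h3 : 3 ≤ t.length
    · by_cases hc : t ∈ s
      · rw [if_pos (by simp [h3]), if_neg (by rw [(PySem.Set.contains_iff s t).2 hc]; simp),
          PySem.Set.add_of_mem hc, ih]
      · rw [if_pos (by simp [h3]),
          if_pos (by rw [pvContains_false hc]; simp [h3]), ih, PySem.Set.add_of_not_mem hc]
        simp
    · rw [if_neg (by simp [h3]), if_neg (by simp [h3]), ih]

theorem pvG_empty_eq (ts : List (List Char)) :
    pvG PySem.Set.empty ts
      = PySem.List.dedup (ts.filter (fun t => decide (3 ≤ t.length))) := by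
  have hfil : PySem.List.dedup (ts.filter (fun t => decide (3 ≤ t.length)))
      = pvUpd PySem.Set.empty ts := by
    rw [PySem.List.dedup, PySem.Set.ofList, List.foldl_filter, pvUpd]
  rw [hfil, pvUpd_eq_append]
  simp [PySem.Set.empty]

theorem pvChunkFold (ts : List (List Char)) (s : PySem.Set (List Char)) :
    ts.foldl
      (fun (st : PySem.Set (List Char) × List (List Char)) c =>
        if PySem.Set.contains st.1 c then st else (PySem.Set.add st.1 c, st.2 ++ [c])) (s, s)
    = (ts.foldl PySem.Set.add s, ts.foldl PySem.Set.add s) := by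
  induction ts generalizing s with
  | nil => rfl
  | cons t ts ih =>
    rw [List.foldl_cons, List.foldl_cons]
    by_cases hc : t ∈ s
    · rw [if_pos ((PySem.Set.contains_iff s t).2 hc), PySem.Set.add_of_mem hc, ih]
    · rw [if_neg (by rw [pvContains_false hc]; simp)]
      rw [PySem.Set.add_of_not_mem hc, ← ih]

theorem pvSplit₀_go (l : List Char) : ∀ cur acc,
    PySem.Chars.split₀.go l cur acc = acc.reverse ++
      (if cur.isEmpty then pvToks PySem.Chars.isspace l
       else (cur.reverse ++ l.takeWhile (fun d => !PySem.Chars.isspace d))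
          :: pvToks PySem.Chars.isspace (l.dropWhile (fun d => !PySem.Chars.isspace d))) := by
  induction l with
  | nil =>
    intro cur acc
    simp only [PySem.Chars.split₀.go]
    cases cur with
    | nil => simp [pvToks]
    | cons x xs => simp [pvToks]
  | cons c rest ih =>
    intro cur acc
    simp only [PySem.Chars.split₀.go]
    by_cases hsp : PySem.Chars.isspace c
    · rw [if_pos hsp]
      cases cur with
      | nil =>
        rw [if_pos (by simp), ih]
        simp [pvToks, hsp]
      | cons x xs =>
        rw [if_neg (by simp), ih]
        simp only [List.isEmpty_nil, if_pos rfl, List.reverse_cons, List.append_assoc]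
        rw [List.takeWhile_cons_of_neg (by simp [hsp]), List.dropWhile_cons_of_neg (by simp [hsp])]
        simp [pvToks, hsp]
    · rw [if_neg hsp, ih]
      cases cur with
      | nil =>
        rw [pvToks, if_neg hsp]
        simp
      | cons x xs =>
        simp only [List.isEmpty_cons]
        rw [if_neg (by simp), if_neg (by simp)]
        rw [List.takeWhile_cons_of_pos (by simp [hsp]), List.dropWhile_cons_of_pos (by simp [hsp])]
        simp

theorem pvSplit₀_eq (cs : List Char) : PySem.Chars.split₀ cs = pvToks PySem.Chars.isspace cs := by
  rw [PySem.Chars.split₀, pvSplit₀_go]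
  simp

theorem pvSplitOn_go (l : List Char) : ∀ fuel, l.length < fuel → ∀ cur acc,
    PySem.Chars.splitOn.go [','] fuel l cur acc
      = acc.reverse ++ ((cur.reverse ++ (pvSegs l).headI) :: (pvSegs l).tail) := by
  induction l with
  | nil =>
    intro fuel hf cur acc
    cases fuel with
    | zero => omega
    | succ f => simp [PySem.Chars.splitOn.go, pvSegs]
  | cons c rest ih =>
    intro fuel hf cur acc
    cases fuel with
    | zero => omega
    | succ f =>
      simp only [PySem.Chars.splitOn.go]
      by_cases hc : c = ','
      · subst hc
        rw [if_pos (by simp)]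
        simp only [List.length_singleton, List.drop_one, List.tail_cons]
        rw [ih f (by simp at hf; omega) [] (cur.reverse :: acc)]
        cases hr : pvSegs rest with
        | nil => exact absurd hr (pvSegs_ne_nil rest)
        | cons h tt =>
          simp [pvSegs, hr]
      · rw [if_neg (by simp [Ne.symm hc])]
        rw [ih f (by simp at hf; omega) (c :: cur) acc]
        simp [pvSegs, hc]
  termination_by l => l

theorem pvSplitOn_eq (cs : List Char) : PySem.Chars.splitOn cs [','] = pvSegs cs := by
  rw [PySem.Chars.splitOn, pvSplitOn_go cs (cs.length + 1) (by omega)]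
  cases hr : pvSegs cs with
  | nil => exact absurd hr (pvSegs_ne_nil cs)
  | cons h tt => simp

theorem pvReplace_go (l : List Char) : ∀ fuel, l.length ≤ fuel → ∀ acc,
    PySem.Chars.replace.go [','] [' '] fuel l acc = acc.reverse ++ l.map pvSub := by
  induction l with
  | nil =>
    intro fuel hf acc
    cases fuel with
    | zero => simp [PySem.Chars.replace.go]
    | succ f => simp [PySem.Chars.replace.go]
  | cons c rest ih =>
    intro fuel hf acc
    cases fuel with
    | zero => simp at hf
    | succ f =>
      simp only [PySem.Chars.replace.go]
      by_cases hc : c = ','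
      · subst hc
        rw [if_pos (by simp)]
        simp only [List.length_singleton, List.drop_one, List.tail_cons]
        rw [ih f (by simp at hf; omega) _]
        simp [pvSub]
      · rw [if_neg (by simp [Ne.symm hc])]
        rw [ih f (by simp at hf; omega) _]
        simp [pvSub, hc]

theorem pvReplace_eq (cs : List Char) :
    PySem.Chars.replace cs [','] [' '] = cs.map pvSub := by
  rw [PySem.Chars.replace, if_neg (by simp), pvReplace_go cs cs.length le_rfl []]
  simp

-- A's token-normalisation is the identity on the tokens the stream actually carries
theorem pvNorm_id (tok : List Char) (u : List Char)
    (hW : ∀ c ∈ tok, PySem.Chars.isspace c = false)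
    (hm : ∀ c ∈ tok, c ∈ PySem.Chars.lower u) :
    PySem.Chars.lower (PySem.Chars.strip tok) = tok := by
  rw [pvStrip_of_noWs tok hW]
  exact pvLower_fix tok u hm

theorem pvStepA_eq (st : PySem.Set (List Char) × List (List Char)) (tok : List Char) :
    (if decide (PySem.Chars.len (PySem.Chars.lower (PySem.Chars.strip tok)) < 3)
        || PySem.Set.contains st.1 (PySem.Chars.lower (PySem.Chars.strip tok)) then st
     else (PySem.Set.add st.1 (PySem.Chars.lower (PySem.Chars.strip tok)),
           st.2 ++ [PySem.Chars.lower (PySem.Chars.strip tok)]))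
    = (if decide (3 ≤ PySem.Chars.len (PySem.Chars.lower (PySem.Chars.strip tok)))
          && !(PySem.Set.contains st.1 (PySem.Chars.lower (PySem.Chars.strip tok)))
       then (PySem.Set.add st.1 (PySem.Chars.lower (PySem.Chars.strip tok)),
             st.2 ++ [PySem.Chars.lower (PySem.Chars.strip tok)]) else st) := by
  set t := PySem.Chars.lower (PySem.Chars.strip tok)
  have h : (decide (PySem.Chars.len t < 3) || PySem.Set.contains st.1 t)
      = !(decide (3 ≤ PySem.Chars.len t) && !(PySem.Set.contains st.1 t)) := by
    simp only [Bool.not_and, Bool.not_not]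
    congr 1
    rcases lt_or_ge (PySem.Chars.len t) 3 with h | h
    · rw [decide_eq_true h, decide_eq_false (by simp only [PySem.Chars.len] at h ⊢; omega), Bool.not_false]
    · rw [decide_eq_false (by simp only [PySem.Chars.len] at h ⊢; omega), decide_eq_true h, Bool.not_true]
  rw [h]
  cases hb : (decide (3 ≤ PySem.Chars.len t) && !(PySem.Set.contains st.1 t)) <;> simp

theorem pvFlatMap_filter (ps : List (List Char)) :
    (ps.filter (fun p => !p.isEmpty)).flatMap PySem.Chars.split₀
      = ps.flatMap PySem.Chars.split₀ := by
  induction ps with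
  | nil => rfl
  | cons p ps ih =>
    by_cases hp : p.isEmpty
    · rw [List.filter_cons_of_neg (by simp [hp]), List.flatMap_cons, ih]
      have : p = [] := by simpa using hp
      subst this
      rw [pvSplit₀_eq, pvToks]
      simp
    · rw [List.filter_cons_of_pos (by simp [hp]), List.flatMap_cons, List.flatMap_cons, ih]

theorem pvFlatMap_congr {α β : Type} (l : List α) (f g : α → List β)
    (h : ∀ x ∈ l, f x = g x) : l.flatMap f = l.flatMap g := by
  induction l with
  | nil => rfl
  | cons x l ih =>
    rw [List.flatMap_cons, List.flatMap_cons, h x (by simp), ih (fun y hy => h y (by simp [hy]))]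

-- out-list characterisations
theorem pvAlt_eq (keyword : String) :
    keyword_token_fallback_terms_py_alt keyword =
      (let raw := PySem.Chars.lower (PySem.Chars.strip keyword.toList)
       let out := pvG PySem.Set.empty (pvToks pvSep raw)
       if 2 ≤ out.length then out.map String.ofList else []) := by
  simp only [keyword_token_fallback_terms_py_alt]
  rw [pvReplace_eq, pvSplit₀_eq, pvToks_map_sub, pvFoldl_eq]
  simp

theorem pvFoldlA_eq (ts : List (List Char)) (s : PySem.Set (List Char)) (o : List (List Char)) :
    ts.foldl
      (fun (st : PySem.Set (List Char) × List (List Char)) tok =>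
        let t := PySem.Chars.lower (PySem.Chars.strip tok)
        if decide (PySem.Chars.len t < 3) || PySem.Set.contains st.1 t then st
        else (PySem.Set.add st.1 t, st.2 ++ [t])) (s, o)
    = (pvUpd s (ts.map (fun tok => PySem.Chars.lower (PySem.Chars.strip tok))),
       o ++ pvG s (ts.map (fun tok => PySem.Chars.lower (PySem.Chars.strip tok)))) := by
  induction ts generalizing s o with
  | nil => simp [pvUpd, pvG]
  | cons tok ts ih =>
    rw [List.foldl_cons]
    show List.foldl _
      (if decide (PySem.Chars.len (PySem.Chars.lower (PySem.Chars.strip tok)) < 3)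
          || PySem.Set.contains s (PySem.Chars.lower (PySem.Chars.strip tok)) then (s, o)
       else (PySem.Set.add s (PySem.Chars.lower (PySem.Chars.strip tok)),
             o ++ [PySem.Chars.lower (PySem.Chars.strip tok)])) ts = _
    rw [pvStepA_eq (s, o) tok]
    set t := PySem.Chars.lower (PySem.Chars.strip tok) with ht
    rw [List.map_cons, pvUpd_cons, pvG]
    by_cases h3 : 3 ≤ t.length
    · by_cases hc : t ∈ s
      · have hcond : (decide (3 ≤ PySem.Chars.len t) && !(PySem.Set.contains s t)) = false := by
          rw [(PySem.Set.contains_iff s t).2 hc]; simp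
        have hcondN : (decide (3 ≤ t.length) && !(PySem.Set.contains s t)) = false := by
          rw [(PySem.Set.contains_iff s t).2 hc]; simp
        simp only [hcond, Bool.false_eq_true, if_false]
        rw [ih, if_pos (show decide (3 ≤ t.length) = true by simp [h3]), PySem.Set.add_of_mem hc]
        simp only [← ht, hcondN, Bool.false_eq_true, if_false]
      · have hcond : (decide (3 ≤ PySem.Chars.len t) && !(PySem.Set.contains s t)) = true := by
          rw [pvContains_false hc]
          simp only [PySem.Chars.len]
          simp [h3]
        have hcondN : (decide (3 ≤ t.length) && !(PySem.Set.contains s t)) = true := by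
          rw [pvContains_false hc]; simp [h3]
        simp only [hcond, if_true]
        rw [ih, if_pos (show decide (3 ≤ t.length) = true by simp [h3])]
        simp only [← ht, hcondN, if_true]
        simp
    · have hcond : (decide (3 ≤ PySem.Chars.len t) && !(PySem.Set.contains s t)) = false := by
        simp only [PySem.Chars.len]
        simp [h3]
      have hcondN : (decide (3 ≤ t.length) && !(PySem.Set.contains s t)) = false := by
        simp [h3]
      simp only [hcond, Bool.false_eq_true, if_false]
      rw [ih, if_neg (show ¬ decide (3 ≤ t.length) = true by simp [h3])]
      simp only [← ht, hcondN, Bool.false_eq_true, if_false]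

-- every token in A's raw-token stream is whitespace-free and drawn from raw
theorem pvA_eq (keyword : String) :
    keyword_token_fallback_terms_py keyword =
      (let raw := PySem.Chars.lower (PySem.Chars.strip keyword.toList)
       let out := pvG PySem.Set.empty
         (((pvKeywordChunks keyword).flatMap PySem.Chars.split₀).map
            (fun tok => PySem.Chars.lower (PySem.Chars.strip tok)))
       if 2 ≤ out.length then out.map String.ofList else []) := by
  simp only [keyword_token_fallback_terms_py]
  rw [PySem.List.foldl_append_eq_flatMap, List.nil_append, pvFoldlA_eq]
  simp

theorem pvMapNorm_id (X : List (List Char)) (u : List Char)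
    (hX : ∀ p ∈ X, ∀ c ∈ p, c ∈ PySem.Chars.lower u) :
    (X.flatMap PySem.Chars.split₀).map (fun tok => PySem.Chars.lower (PySem.Chars.strip tok))
      = X.flatMap PySem.Chars.split₀ := by
  conv_rhs => rw [← List.map_id (X.flatMap PySem.Chars.split₀)]
  apply List.map_congr_left
  intro tok htok
  obtain ⟨p, hp, htokp⟩ := List.mem_flatMap.1 htok
  rw [pvSplit₀_eq] at htokp
  obtain ⟨hne, hprops⟩ := pvToks_sound _ _ _ htokp
  exact pvNorm_id tok u (fun c hc => (hprops c hc).1) (fun c hc => hX p hp c ((hprops c hc).2))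

theorem pvStream_eq (raw : List Char) :
    (((PySem.Chars.splitOn raw [',']).map PySem.Chars.strip).filter
        (fun p => !p.isEmpty)).flatMap PySem.Chars.split₀
      = pvToks pvSep raw := by
  rw [pvFlatMap_filter, List.flatMap_map]
  rw [pvFlatMap_congr _ _ PySem.Chars.split₀ (fun p _ => by
    rw [pvSplit₀_eq, pvToks_strip, ← pvSplit₀_eq])]
  rw [pvSplitOn_eq]
  rw [pvFlatMap_congr _ _ (pvToks PySem.Chars.isspace) (fun p _ => pvSplit₀_eq p)]
  exact pvFlatMap_segs raw

theorem pvUnchanged (keyword : String)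
    (hD : ¬ D_keyword_token_fallback_terms_py keyword) :
    keyword_token_fallback_terms_py keyword = keyword_token_fallback_terms_py_alt keyword := by
  rw [pvA_eq, pvAlt_eq]
  simp only [pvKeywordChunks]
  by_cases hre : (PySem.Chars.lower (PySem.Chars.strip keyword.toList)).isEmpty
  · have hr : PySem.Chars.lower (PySem.Chars.strip keyword.toList) = [] := by simpa using hre
    rw [if_pos hre]
    rw [hr]
    simp [pvG, pvToks]
  · rw [if_neg hre]
    have hrne : PySem.Chars.lower (PySem.Chars.strip keyword.toList) ≠ [] := by
      simpa using hre
    by_cases hce : ((((PySem.Chars.splitOn (PySem.Chars.lower (PySem.Chars.strip keyword.toList)) [',']).map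
        PySem.Chars.strip).filter (fun p => !p.isEmpty))).isEmpty
    · -- fallback: every comma-part strips to nothing, so raw is commas and whitespace only
      have hc0 : (((PySem.Chars.splitOn (PySem.Chars.lower (PySem.Chars.strip keyword.toList)) [',']).map
          PySem.Chars.strip).filter (fun p => !p.isEmpty)) = [] := by simpa using hce
      have hAll : ∀ c ∈ PySem.Chars.lower (PySem.Chars.strip keyword.toList),
          c = ',' ∨ PySem.Chars.isspace c = true := by
        intro c hc
        rcases pvSegs_complete _ c hc with h | ⟨p, hp, hcp⟩
        · exact Or.inl h
        · right
          have hpseg : p ∈ PySem.Chars.splitOn (PySem.Chars.lower (PySem.Chars.strip keyword.toList)) [','] := by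
            rw [pvSplitOn_eq]; exact hp
          have hstrip : PySem.Chars.strip p = [] := by
            have := List.filter_eq_nil_iff.1 hc0 (PySem.Chars.strip p)
              (List.mem_map.2 ⟨p, hpseg, rfl⟩)
            simpa using this
          exact (pvStrip_eq_nil_iff p).1 hstrip c hcp
      have hBnil : pvToks pvSep (PySem.Chars.lower (PySem.Chars.strip keyword.toList)) = [] := by
        apply pvToks_eq_nil
        intro c hc
        rcases hAll c hc with h | h
        · simp [pvSep, h]
        · simp [pvSep, h]
      rw [if_pos hce, hBnil]
      have hAstream : (([(PySem.Chars.lower (PySem.Chars.strip keyword.toList))].flatMap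
            PySem.Chars.split₀).map (fun tok => PySem.Chars.lower (PySem.Chars.strip tok)))
          = PySem.Chars.split₀ (PySem.Chars.lower (PySem.Chars.strip keyword.toList)) := by
        rw [pvMapNorm_id _ (PySem.Chars.strip keyword.toList) (fun p hp c hc => by
          simp only [List.mem_singleton] at hp
          exact hp ▸ hc)]
        simp
      rw [hAstream, pvG_empty_eq]
      have hnot2 : ¬ 2 ≤ (PySem.List.dedup ((PySem.Chars.split₀
          (PySem.Chars.lower (PySem.Chars.strip keyword.toList))).filter
            (fun t => decide (3 ≤ t.length)))).length := by
        intro h2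
        exact hD ⟨hrne, hAll, h2⟩
      rw [if_neg hnot2]
      simp [pvG]
    · -- main case: the two token streams coincide
      rw [if_neg hce, PySem.Set.empty_eq, pvChunkFold, ← PySem.Set.ofList_eq_foldl]
      rw [pvMapNorm_id _ (PySem.Chars.strip keyword.toList) (fun p hp c hc => by
        have hp' := (PySem.Set.mem_ofList _ _).1 hp
        obtain ⟨q, hq, hpq⟩ := List.mem_map.1 (List.mem_of_mem_filter hp')
        rw [pvSplitOn_eq] at hq
        exact (pvSegs_sound _ q hq c (pvStrip_subset q c (hpq ▸ hc))).1)]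
      rw [pvG_dedup, pvStream_eq]

theorem pvTight (keyword : String)
    (hD : D_keyword_token_fallback_terms_py keyword) :
    keyword_token_fallback_terms_py keyword ≠ keyword_token_fallback_terms_py_alt keyword := by
  simp only [D_keyword_token_fallback_terms_py] at hD
  obtain ⟨hrne, hAll, h2⟩ := hD
  rw [pvA_eq, pvAlt_eq]
  simp only [pvKeywordChunks]
  have hre : ¬ (PySem.Chars.lower (PySem.Chars.strip keyword.toList)).isEmpty := by
    simpa using hrne
  rw [if_neg hre]
  have hc0 : (((PySem.Chars.splitOn (PySem.Chars.lower (PySem.Chars.strip keyword.toList)) [',']).map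
      PySem.Chars.strip).filter (fun p => !p.isEmpty)) = [] := by
    apply List.filter_eq_nil_iff.2
    intro p hp
    obtain ⟨q, hq, hpq⟩ := List.mem_map.1 hp
    rw [pvSplitOn_eq] at hq
    have hqws : ∀ c ∈ q, PySem.Chars.isspace c = true := by
      intro c hc
      have hs := pvSegs_sound _ q hq c hc
      rcases hAll c hs.1 with h | h
      · exact absurd h hs.2
      · exact h
    have : PySem.Chars.strip q = [] := (pvStrip_eq_nil_iff q).2 hqws
    simp [← hpq, this]
  rw [hc0]
  rw [if_pos (List.isEmpty_nil)]
  have hBnil : pvToks pvSep (PySem.Chars.lower (PySem.Chars.strip keyword.toList)) = [] := by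
    apply pvToks_eq_nil
    intro c hc
    rcases hAll c hc with h | h
    · simp [pvSep, h]
    · simp [pvSep, h]
  rw [hBnil]
  have hAstream : (([(PySem.Chars.lower (PySem.Chars.strip keyword.toList))].flatMap
        PySem.Chars.split₀).map (fun tok => PySem.Chars.lower (PySem.Chars.strip tok)))
      = PySem.Chars.split₀ (PySem.Chars.lower (PySem.Chars.strip keyword.toList)) := by
    rw [pvMapNorm_id _ (PySem.Chars.strip keyword.toList) (fun p hp c hc => by
      simp only [List.mem_singleton] at hp
      exact hp ▸ hc)]
    simp
  rw [hAstream, pvG_empty_eq, if_pos h2]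
  have hlne : (PySem.List.dedup ((PySem.Chars.split₀
      (PySem.Chars.lower (PySem.Chars.strip keyword.toList))).filter
        (fun t => decide (3 ≤ t.length)))) ≠ [] := by
    intro h
    rw [h] at h2
    simp at h2
  intro heq
  rw [show pvG PySem.Set.empty ([] : List (List Char)) = [] from rfl] at heq
  simp only [List.length_nil] at heq
  rw [if_neg (by omega)] at heq
  exact hlne (by simpa [List.map_eq_nil_iff] using heq)

-- ===== VERDICT (by name: the statement is the Claim_ definition above) =====
theorem keyword_token_fallback_terms_py_spec : Claim_unchanged_keyword_token_fallback_terms_py := by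
  intro keyword _
  unfold Spec_keyword_token_fallback_terms_py
  exact fun hD => pvUnchanged keyword hD

set_option maxRecDepth 8000 in
theorem keyword_token_fallback_terms_py_changed : Claim_changed_keyword_token_fallback_terms_py := by
  unfold Claim_changed_keyword_token_fallback_terms_py
  refine ⟨by decide, ?_, by rfl, by rfl, by decide⟩
  simp only [D_keyword_token_fallback_terms_py, pvDiffWitness_keyword_token_fallback_terms_py]
  refine ⟨by decide, ?_, by decide⟩
  have h : (PySem.Chars.lower (PySem.Chars.strip (",,, ,,,,").toList)).all
      (fun c => c == ',' || PySem.Chars.isspace c) = true := by decide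
  intro c hc
  have hb := List.all_eq_true.1 h c hc
  rcases Bool.or_eq_true_iff.1 hb with h' | h'
  · exact Or.inl (by simpa using h')
  · exact Or.inr h'

theorem keyword_token_fallback_terms_py_tight : Claim_exact_keyword_token_fallback_terms_py := by
  intro keyword _ hD
  exact pvTight keyword hD
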